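-- pv_equiv track=rewrite | github.com/daedalus/libciphers | src/libciphers/__init__.py | alternating_keys_dec
-- ===== SOURCE A (Python) =====
-- import string
--
-- A = string.ascii_uppercase
--
-- def let2n(c):
--     """Letter to number (A=0, B=1, ..., Z=25)"""
--     return ord(c.upper()) - 65 if c.upper() in A else -1
--
-- def n2let(n):
--     """Number to letter (0=A, 1=B, ..., 25=Z)"""
--     return chr((n % 26) + 65)
--
-- def alternating_keys_dec(ct, key1, key2, pattern):
--     """Switch between keys based on pattern"""
--     result = []
--     for i, c in enumerate(ct):
--         if c in A:
--             if pattern[i % len(pattern)] == "A":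
--                 k = let2n(key1[i % len(key1)])
--             else:
--                 k = let2n(key2[i % len(key2)])
--             shift = (k + i) % 26
--             result.append(n2let((let2n(c) - shift) % 26))
--         else:
--             result.append(c)
--     return "".join(result)
-- ===== SOURCE B (Python) =====
-- import string
--
-- A = string.ascii_uppercase
--
-- def let2n(c):
--     """Letter to number (A=0, B=1, ..., Z=25)"""
--     return ord(c.upper()) - 65 if c.upper() in A else -1
--
-- def n2let(n):
--     """Number to letter (0=A, 1=B, ..., 25=Z)"""
--     return chr((n % 26) + 65)
--
-- def alternating_keys_dec(ct, key1, key2, pattern):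
--     """Gather the uppercase positions first, then scatter-decrypt them in place,
--     sharing one memoized 26-letter substitution table per position class."""
--     out = list(ct)
--     tables = {}
--     for i in [j for j in range(len(ct)) if ct[j] in A]:
--         pc = pattern[i % len(pattern)]
--         idx = i % (len(key1) if pc == "A" else len(key2))
--         cls = (pc, idx, i % 26)
--         tbl = tables.get(cls)
--         if tbl is None:
--             kc = key1[idx] if pc == "A" else key2[idx]
--             s = (let2n(kc) + i) % 26
--             tbl = {ch: n2let(let2n(ch) - s) for ch in A}
--             tables[cls] = tbl
--         out[i] = tbl[out[i]]
--     return "".join(out)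
-- ===== Notes on version B (the rewrite author's own statement) =====
-- stated objective: alternative
-- what changed: B gathers the uppercase positions first and scatter-decrypts them in place in a mutable character array, replacing A's per-character modular arithmetic by memoized 26-letter substitution tables shared across all positions of the same (pattern char, key index, i mod 26) class.
import Mathlib
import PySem

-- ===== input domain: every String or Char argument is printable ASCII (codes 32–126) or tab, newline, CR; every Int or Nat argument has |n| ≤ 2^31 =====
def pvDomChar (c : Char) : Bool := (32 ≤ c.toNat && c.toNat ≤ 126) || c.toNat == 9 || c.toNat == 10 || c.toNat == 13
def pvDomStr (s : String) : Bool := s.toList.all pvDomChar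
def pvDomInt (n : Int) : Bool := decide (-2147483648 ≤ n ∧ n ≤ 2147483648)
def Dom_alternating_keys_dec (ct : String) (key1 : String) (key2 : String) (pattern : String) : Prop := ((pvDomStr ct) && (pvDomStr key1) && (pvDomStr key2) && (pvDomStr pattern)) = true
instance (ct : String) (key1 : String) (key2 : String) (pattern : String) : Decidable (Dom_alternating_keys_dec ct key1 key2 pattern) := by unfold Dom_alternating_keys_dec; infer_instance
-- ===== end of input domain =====

-- B gathers the uppercase positions first and scatter-decrypts them in place,
-- using memoized per-class substitution tables instead of A's per-character
-- modular arithmetic (objective: alternative algorithm, same cost).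

-- shared module helpers (A = string.ascii_uppercase, let2n, n2let)
def pyUpperA : List Char := "ABCDEFGHIJKLMNOPQRSTUVWXYZ".toList

def let2n (c : Char) : Int :=
  if pyUpperA.contains c.toUpper then (c.toUpper.toNat : Int) - 65 else -1

def n2let (n : Int) : Char :=
  Char.ofNat ((PySem.Int.mod n 26).toNat + 65)

-- ===== PORT A =====
-- loop index i advances over every character; getD's default only reachable outside Pre_
def akdGo (k1 k2 pat : List Char) (i : Nat) (rem : List Char) : List Char :=
  match rem with
  | [] => []
  | c :: rest =>
    (if pyUpperA.contains c then
       let k : Int := if pat.getD (i % pat.length) ' ' = 'A'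
                      then let2n (k1.getD (i % k1.length) ' ')
                      else let2n (k2.getD (i % k2.length) ' ')
       let shift := PySem.Int.mod (k + (i : Int)) 26
       n2let (PySem.Int.mod (let2n c - shift) 26)
     else c) :: akdGo k1 k2 pat (i + 1) rest

def alternating_keys_dec (ct : String) (key1 : String) (key2 : String) (pattern : String) : String :=
  String.mk (akdGo key1.toList key2.toList pattern.toList 0 ct.toList)

-- ===== PORT B =====
-- B's helpers, matching Source B line for line: pcOf/idxOf/kcOf name the intermediate
-- values pc/idx/kc of the loop body; mkTbl is the dict comprehension {ch: …}.
def pcOf (pat : List Char) (i : Nat) : Char := pat.getD (i % pat.length) ' '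

def idxOf (k1 k2 pat : List Char) (i : Nat) : Nat :=
  i % (if pcOf pat i = 'A' then k1.length else k2.length)

def kcOf (k1 k2 pat : List Char) (i : Nat) : Char :=
  if pcOf pat i = 'A' then k1.getD (idxOf k1 k2 pat i) ' ' else k2.getD (idxOf k1 k2 pat i) ' '

def clsOf (k1 k2 pat : List Char) (i : Nat) : Char × Int × Int :=
  (pcOf pat i, (idxOf k1 k2 pat i : Int), ((i % 26 : Nat) : Int))

def mkTbl (s : Int) : PySem.Dict Char Char :=
  PySem.Dict.ofList (pyUpperA.map (fun ch => (ch, n2let (let2n ch - s))))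

-- [j for j in range(len(ct)) if ct[j] in A]
def bHits (ct : List Char) : List Nat :=
  (PySem.List.pyRange 0 (ct.length : Int) 1).filterMap
    (fun j => if pyUpperA.contains (PySem.List.pyGetD ct j ' ') then some j.toNat else none)

-- the scatter loop: out is the mutable character list, tables the memo dict
def bGo (k1 k2 pat : List Char) (hits : List Nat) (out : List Char)
    (tables : PySem.Dict (Char × Int × Int) (PySem.Dict Char Char)) : List Char :=
  match hits with
  | [] => out
  | i :: rest =>
    let c := out.getD i ' '
    match tables.get? (clsOf k1 k2 pat i) with
    | some tbl => bGo k1 k2 pat rest (out.set i (tbl.getD c c)) tables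
    | none =>
      let s := PySem.Int.mod (let2n (kcOf k1 k2 pat i) + (i : Int)) 26
      let tbl := mkTbl s
      bGo k1 k2 pat rest (out.set i (tbl.getD c c)) (tables.insert (clsOf k1 k2 pat i) tbl)

def alternating_keys_dec_alt (ct : String) (key1 : String) (key2 : String) (pattern : String) : String :=
  String.mk (bGo key1.toList key2.toList pattern.toList (bHits ct.toList) ct.toList PySem.Dict.empty)

-- ===== PRECONDITION & SPEC =====
-- Pre_ is exactly where the Python A returns: at every uppercase position the
-- pattern is nonempty and the key it selects there is nonempty (otherwise A —
-- and B alike — raises ZeroDivisionError/IndexError).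
def Pre_alternating_keys_dec (ct : String) (key1 : String) (key2 : String) (pattern : String) : Prop :=
  ∀ j, j < ct.toList.length → pyUpperA.contains (ct.toList.getD j ' ') = true →
    pattern.toList ≠ [] ∧
    (if pattern.toList.getD (j % pattern.toList.length) ' ' = 'A'
     then key1.toList ≠ [] else key2.toList ≠ [])
instance (ct : String) (key1 : String) (key2 : String) (pattern : String) : Decidable (Pre_alternating_keys_dec ct key1 key2 pattern) := by unfold Pre_alternating_keys_dec; infer_instance

def pvWitness_alternating_keys_dec : String × String × String × String :=
  ("HELLO, World!", "KEY", "B", "AB")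

def Spec_alternating_keys_dec (ct : String) (key1 : String) (key2 : String) (pattern : String) (out : String) : Prop := out = alternating_keys_dec_alt ct key1 key2 pattern
instance (ct : String) (key1 : String) (key2 : String) (pattern : String) (out : String) : Decidable (Spec_alternating_keys_dec ct key1 key2 pattern out) := by unfold Spec_alternating_keys_dec; infer_instance

-- ===== CLAIM (what is proved, stated in full; the proofs are below) =====
def Claim_equal_alternating_keys_dec : Prop := ∀ (ct : String) (key1 : String) (key2 : String) (pattern : String), Dom_alternating_keys_dec ct key1 key2 pattern → Pre_alternating_keys_dec ct key1 key2 pattern → Spec_alternating_keys_dec ct key1 key2 pattern (alternating_keys_dec ct key1 key2 pattern)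

-- ===== LEMMAS AND PROOFS =====

-- A's per-position shift, named for the proofs (definitional for both ports)
def sOf (k1 k2 pat : List Char) (i : Nat) : Int :=
  PySem.Int.mod (let2n (kcOf k1 k2 pat i) + (i : Int)) 26

-- A's per-position output character
def aVal (k1 k2 pat : List Char) (i : Nat) (c : Char) : Char :=
  if pyUpperA.contains c then n2let (PySem.Int.mod (let2n c - sOf k1 k2 pat i) 26) else c

-- canonical table of a class: what every stored table must equal
def canonTbl (k1 k2 : List Char) (cls : Char × Int × Int) : PySem.Dict Char Char :=
  mkTbl (PySem.Int.mod
    (let2n (if cls.1 = 'A' then k1.getD cls.2.1.toNat ' ' else k2.getD cls.2.1.toNat ' ')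
     + cls.2.2) 26)

def TblInv (k1 k2 : List Char) (tables : PySem.Dict (Char × Int × Int) (PySem.Dict Char Char)) : Prop :=
  ∀ cls tbl, tables.get? cls = some tbl → tbl = canonTbl k1 k2 cls

lemma n2let_congr {x y : Int} (h : x % 26 = y % 26) : n2let x = n2let y := by
  unfold n2let
  rw [PySem.Int.mod_eq_emod_of_pos (by norm_num), PySem.Int.mod_eq_emod_of_pos (by norm_num), h]

lemma canonTbl_clsOf (k1 k2 pat : List Char) (i : Nat) :
    canonTbl k1 k2 (clsOf k1 k2 pat i) = mkTbl (sOf k1 k2 pat i) := by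
  unfold canonTbl clsOf sOf kcOf
  simp only [Int.toNat_natCast]
  congr 1
  simp only [PySem.Int.mod_eq_emod_of_pos (b := 26) (by norm_num)]
  omega

lemma getD_insertLoop (f : Char → Char) :
    ∀ (l : List Char) (d : PySem.Dict Char Char) (c d0 : Char),
      (l.foldl (fun acc ch => acc.insert ch (f ch)) d).getD c d0 =
        if c ∈ l then f c else d.getD c d0 := by
  intro l
  induction l with
  | nil => intro d c d0; simp
  | cons a l ih =>
    intro d c d0
    rw [List.foldl_cons, ih]
    by_cases hca : c = a
    · by_cases hcl : c ∈ l <;> simp [hca]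
    · by_cases hcl : c ∈ l <;> simp [hca, hcl, PySem.Dict.getD_insert]

lemma mkTbl_getD (s : Int) (c : Char) (h : pyUpperA.contains c = true) (d : Char) :
    (mkTbl s).getD c d = n2let (let2n c - s) := by
  have hc : c ∈ pyUpperA := by simpa using h
  unfold mkTbl PySem.Dict.ofList PySem.Dict.update
  rw [List.foldl_map, getD_insertLoop (fun ch => n2let (let2n ch - s)) pyUpperA _ c d]
  simp [hc]

lemma bGo_length (k1 k2 pat : List Char) :
    ∀ (hits : List Nat) (out : List Char) tables,
      (bGo k1 k2 pat hits out tables).length = out.length := by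
  intro hits
  induction hits with
  | nil => intro out tables; simp [bGo]
  | cons i rest ih =>
    intro out tables
    unfold bGo
    cases h : tables.get? (clsOf k1 k2 pat i) <;>
      simp only [] <;> rw [ih] <;> simp

lemma TblInv_insert (k1 k2 pat : List Char) (i : Nat) (tables : PySem.Dict (Char × Int × Int) (PySem.Dict Char Char))
    (hinv : TblInv k1 k2 tables) :
    TblInv k1 k2 (tables.insert (clsOf k1 k2 pat i) (mkTbl (sOf k1 k2 pat i))) := by
  intro cls tbl hget
  rw [PySem.Dict.get?_insert] at hget
  by_cases hc : cls = clsOf k1 k2 pat i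
  · rw [if_pos hc] at hget
    rw [hc, canonTbl_clsOf]
    exact (Option.some_inj.mp hget).symm
  · rw [if_neg hc] at hget
    exact hinv cls tbl hget

lemma getD_set_ne (l : List Char) (i j : Nat) (c : Char) (h : j ≠ i) :
    (l.set i c).getD j ' ' = l.getD j ' ' := by
  simp [List.getD_eq_getElem?_getD, h.symm]

lemma getD_set_self (l : List Char) (i : Nat) (c : Char) (h : i < l.length) :
    (l.set i c).getD i ' ' = c := by
  simp [List.getD_eq_getElem?_getD, h]

lemma bGo_getD (k1 k2 pat : List Char) :
    ∀ (hits : List Nat) (out : List Char) tables,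
      hits.Nodup → (∀ i ∈ hits, i < out.length) → TblInv k1 k2 tables →
      (∀ i ∈ hits, pyUpperA.contains (out.getD i ' ') = true) → ∀ j,
      (bGo k1 k2 pat hits out tables).getD j ' ' =
        if j ∈ hits then n2let (let2n (out.getD j ' ') - sOf k1 k2 pat j)
        else out.getD j ' ' := by
  intro hits
  induction hits with
  | nil => intro out tables _ _ _ _ j; simp [bGo]
  | cons i rest ih =>
    intro out tables hnd hlt hinv hup j
    have hnotmem : i ∉ rest := (List.nodup_cons.mp hnd).1
    have hndr : rest.Nodup := (List.nodup_cons.mp hnd).2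
    have hilt : i < out.length := hlt i (by simp)
    have hupi : pyUpperA.contains (out.getD i ' ') = true := hup i (by simp)
    -- the written value is the same in both match branches
    have hval : ∀ tbl, tbl = mkTbl (sOf k1 k2 pat i) →
        tbl.getD (out.getD i ' ') (out.getD i ' ') =
          n2let (let2n (out.getD i ' ') - sOf k1 k2 pat i) := by
      intro tbl htbl; rw [htbl, mkTbl_getD _ _ hupi]
    set v := n2let (let2n (out.getD i ' ') - sOf k1 k2 pat i) with hv
    have main : ∀ tables', TblInv k1 k2 tables' →
        (bGo k1 k2 pat rest (out.set i v) tables').getD j ' ' =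
          if j ∈ i :: rest then n2let (let2n (out.getD j ' ') - sOf k1 k2 pat j)
          else out.getD j ' ' := by
      intro tables' hinv'
      rw [ih (out.set i v) tables' hndr
          (by intro x hx; rw [List.length_set]; exact hlt x (by simp [hx]))
          hinv'
          (by intro x hx
              rw [getD_set_ne out i x v (by rintro rfl; exact hnotmem hx)]
              exact hup x (by simp [hx]))]
      by_cases hji : j = i
      · subst hji
        rw [if_neg hnotmem, if_pos (by simp), getD_set_self out j v hilt]
      · rw [getD_set_ne out i j v hji]
        by_cases hjr : j ∈ rest
        · rw [if_pos hjr, if_pos (by simp [hjr])]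
        · rw [if_neg hjr, if_neg (by simp [hji, hjr])]
    unfold bGo
    cases hget : tables.get? (clsOf k1 k2 pat i) with
    | some tbl =>
      simp only []
      rw [hval tbl (by rw [hinv _ tbl hget, canonTbl_clsOf])]
      exact main tables hinv
    | none =>
      simp only []
      rw [hval (mkTbl (PySem.Int.mod (let2n (kcOf k1 k2 pat i) + (i : Int)) 26)) rfl]
      exact main _ (TblInv_insert k1 k2 pat i tables hinv)

lemma bHits_eq (l : List Char) :
    bHits l = (List.range l.length).filter (fun k => pyUpperA.contains (l.getD k ' ')) := by
  unfold bHits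
  rw [PySem.List.pyRange_zero_natCast, List.filterMap_map]
  rw [← List.filterMap_eq_filter]
  congr 1
  funext k
  simp [PySem.List.pyGetD_natCast, Option.guard]

lemma akdGo_eq (k1 k2 pat : List Char) :
    ∀ (rem : List Char) (i : Nat),
      akdGo k1 k2 pat i rem = (rem.zipIdx i).map (fun p => aVal k1 k2 pat p.2 p.1) := by
  intro rem
  induction rem with
  | nil => intro i; simp [akdGo]
  | cons c rest ih =>
    intro i
    rw [akdGo, List.zipIdx_cons, List.map_cons, ih (i + 1)]
    congr 1
    have hs : PySem.Int.mod
        ((if pat.getD (i % pat.length) ' ' = 'A'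
          then let2n (k1.getD (i % k1.length) ' ')
          else let2n (k2.getD (i % k2.length) ' ')) + (i : Int)) 26 = sOf k1 k2 pat i := by
      unfold sOf kcOf idxOf pcOf
      by_cases hpc : pat.getD (i % pat.length) ' ' = 'A'
      · rw [if_pos hpc, if_pos hpc, if_pos hpc]
      · rw [if_neg hpc, if_neg hpc, if_neg hpc]
    by_cases hc : pyUpperA.contains c = true
    · rw [if_pos hc]
      show n2let (PySem.Int.mod (let2n c - PySem.Int.mod
          ((if pat.getD (i % pat.length) ' ' = 'A'
            then let2n (k1.getD (i % k1.length) ' ')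
            else let2n (k2.getD (i % k2.length) ' ')) + (i : Int)) 26) 26) =
        aVal k1 k2 pat i c
      unfold aVal
      rw [if_pos hc, hs]
    · rw [if_neg hc]
      unfold aVal
      rw [if_neg hc]

lemma list_eq (k1 k2 pat ct : List Char) :
    akdGo k1 k2 pat 0 ct = bGo k1 k2 pat (bHits ct) ct PySem.Dict.empty := by
  have hhits := bHits_eq ct
  have hmem : ∀ j, j ∈ bHits ct ↔ j < ct.length ∧ pyUpperA.contains (ct.getD j ' ') = true := by
    intro j; rw [hhits]; simp [List.mem_filter, List.mem_range]
  apply List.ext_getElem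
  · rw [akdGo_eq, bGo_length]
    simp
  · intro j hj1 hj2
    have hjlen : j < ct.length := by
      have h := hj1; rw [akdGo_eq] at h; simpa using h
    rw [← List.getD_eq_getElem (akdGo k1 k2 pat 0 ct) ' ' hj1,
        ← List.getD_eq_getElem _ ' ' hj2,
        akdGo_eq]
    have hmap : (List.map (fun p => aVal k1 k2 pat p.2 p.1) (ct.zipIdx 0)).getD j ' ' =
        aVal k1 k2 pat j ct[j] := by
      have hjm : j < (List.map (fun p => aVal k1 k2 pat p.2 p.1) (ct.zipIdx 0)).length := by
        simpa using hjlen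
      rw [List.getD_eq_getElem _ ' ' hjm, List.getElem_map, List.getElem_zipIdx]
      simp
    rw [hmap, bGo_getD k1 k2 pat (bHits ct) ct PySem.Dict.empty
        (by rw [hhits]; exact (List.nodup_range).filter _)
        (by intro x hx; exact ((hmem x).mp hx).1)
        (by intro cls tbl h; simp [PySem.Dict.get?_empty] at h)
        (by intro x hx; exact ((hmem x).mp hx).2) j]
    have hct : ct.getD j ' ' = ct[j] := List.getD_eq_getElem ct ' ' hjlen
    unfold aVal
    by_cases hup : pyUpperA.contains ct[j] = true
    · rw [if_pos hup,
          if_pos ((hmem j).mpr ⟨hjlen, by rw [hct]; exact hup⟩), hct]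
      apply (n2let_congr _).symm
      rw [PySem.Int.mod_eq_emod_of_pos (by norm_num : (0:Int) < 26)]
      omega
    · rw [if_neg hup,
          if_neg (fun h => hup (by rw [← hct]; exact ((hmem j).mp h).2)), hct]

-- ===== VERDICT (by name: the statement is the Claim_ definition above) =====
theorem alternating_keys_dec_spec : Claim_equal_alternating_keys_dec := by
  intro ct key1 key2 pattern _ _
  unfold Spec_alternating_keys_dec alternating_keys_dec alternating_keys_dec_alt
  rw [list_eq]
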